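-- pv_equiv track=rewrite | github.com/patronrpg/patronrpg.github.io | scripts/simple_character_generator.py | load_goals_neutral_small
-- ===== SOURCE A (Python) =====
-- def load_goals_neutral_small(data):
--     goals_neutral_small = []
--     goal_name = None
--     for line in data.splitlines():
--         if line.strip():
--             if goal_name is None:
--                 goal_name = line.strip()
--                 continue
--             goals_neutral_small.append((goal_name, line.strip()))
--             goal_name = None
--     return goals_neutral_small
-- ===== SOURCE B (Python) =====
-- def _pairs(lines):
--     if len(lines) < 2:
--         return []
--     return [(lines[0], lines[1])] + _pairs(lines[2:])
--
--
-- def load_goals_neutral_small(data):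
--     lines = [l.strip() for l in data.splitlines() if l.strip()]
--     return _pairs(lines)
-- ===== Notes on version B (the rewrite author's own statement) =====
-- stated objective: simpler
-- what changed: Replaces the stateful toggle loop (an Option-typed pending name threaded through one pass) with a two-step decomposition: first collect all stripped non-empty lines, then pair consecutive ones, dropping a dangling final name automatically.
import Mathlib
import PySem

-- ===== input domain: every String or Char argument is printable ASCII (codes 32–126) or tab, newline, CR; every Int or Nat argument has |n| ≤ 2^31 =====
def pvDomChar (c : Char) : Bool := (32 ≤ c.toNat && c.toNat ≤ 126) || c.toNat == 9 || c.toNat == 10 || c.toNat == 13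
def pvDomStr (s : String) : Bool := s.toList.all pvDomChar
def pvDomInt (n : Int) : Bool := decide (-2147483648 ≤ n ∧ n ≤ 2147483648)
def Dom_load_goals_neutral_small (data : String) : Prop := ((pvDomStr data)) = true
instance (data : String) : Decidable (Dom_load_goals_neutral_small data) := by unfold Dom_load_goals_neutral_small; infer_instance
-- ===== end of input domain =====

-- B replaces A's toggle-state loop by filter-strip-then-pair-consecutive (simpler decomposition, same cost).

-- ===== PORT A =====
-- toggle loop: state = (accumulated pairs, pending goal name)
def load_goals_neutral_small (data : String) : List (String × String) :=
  ((PySem.Str.splitlines data).foldl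
    (fun st line =>
      let s := PySem.Str.strip line
      if s ≠ "" then
        match st.2 with
        | none => (st.1, some s)
        | some gn => (st.1 ++ [(gn, s)], none)
      else st)
    ([], none)).1

-- ===== PORT B =====
-- _pairs: pair consecutive elements, dropping a dangling last one
def pvPairsB : List String → List (String × String)
  | a :: b :: rest => (a, b) :: pvPairsB rest
  | _ => []

def load_goals_neutral_small_alt (data : String) : List (String × String) :=
  pvPairsB (((PySem.Str.splitlines data).filter
      (fun l => PySem.Str.strip l ≠ "")).map PySem.Str.strip)

-- ===== PRECONDITION & SPEC =====
def Spec_load_goals_neutral_small (data : String) (out : List (String × String)) : Prop := out = load_goals_neutral_small_alt data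
instance (data : String) (out : List (String × String)) : Decidable (Spec_load_goals_neutral_small data out) := by unfold Spec_load_goals_neutral_small; infer_instance

-- ===== CLAIM (what is proved, stated in full; the proofs are below) =====
def Claim_equal_load_goals_neutral_small : Prop := ∀ (data : String), Dom_load_goals_neutral_small data → Spec_load_goals_neutral_small data (load_goals_neutral_small data)

-- ===== LEMMAS AND PROOFS =====

-- the pending name g (none or one waiting name) is exactly a prefix of the list pvPairsB consumes
theorem pvLoop_eq (lines : List String) :
    ∀ (acc : List (String × String)) (g : Option String),
    (lines.foldl
      (fun st line =>
        let s := PySem.Str.strip line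
        if s ≠ "" then
          match st.2 with
          | none => (st.1, some s)
          | some gn => (st.1 ++ [(gn, s)], none)
        else st)
      (acc, g)).1
    = acc ++ pvPairsB ((g.toList) ++ (lines.filter (fun l => PySem.Str.strip l ≠ "")).map PySem.Str.strip) := by
  induction lines with
  | nil =>
    intro acc g
    cases g <;> simp [pvPairsB]
  | cons l rest ih =>
    intro acc g
    by_cases hs : PySem.Str.strip l = ""
    · have h := ih acc g
      simp at h ⊢
      simp [hs, h]
    · cases g with
      | none =>
        have h := ih acc (some (PySem.Str.strip l))
        simp at h ⊢
        simp [hs, h]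
      | some gn =>
        have h := ih (acc ++ [(gn, PySem.Str.strip l)]) none
        simp at h ⊢
        simp [hs, h, pvPairsB]

-- ===== VERDICT (by name: the statement is the Claim_ definition above) =====
theorem load_goals_neutral_small_spec : Claim_equal_load_goals_neutral_small := by
  intro data _
  unfold Spec_load_goals_neutral_small load_goals_neutral_small load_goals_neutral_small_alt
  simpa using pvLoop_eq (PySem.Str.splitlines data) [] none
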